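-- pv_equiv track=rewrite | github.com/linto-ai/linto-diarization | simple/diarization/processing/simple_diarizer/simple_diarizer/nmesc_clustering.py | getRepeatedList
-- ===== SOURCE A (Python) =====
-- from collections import Counter
--
-- def getRepeatedList(mapping_argmat, score_mat_size):
--     """
--     Count the numbers in the mapping dictionary and create lists that contain
--     repeated indices to be used for creating the repeated affinity matrix for
--     fusing the affinity values.
--     """
--     count_dict = dict(Counter(mapping_argmat))
--     repeat_list = []
--     for k in range(score_mat_size):
--         if k in count_dict:
--             repeat_list.append(count_dict[k])
--         else:
--             repeat_list.append(0)
--     return repeat_list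
-- ===== SOURCE B (Python) =====
-- from collections import deque
--
-- def getRepeatedList(mapping_argmat, score_mat_size):
--     vals = deque(sorted(mapping_argmat))
--     repeat_list = []
--     for k in range(score_mat_size):
--         while vals and vals[0] < k:
--             vals.popleft()
--         c = 0
--         while vals and vals[0] == k:
--             c += 1
--             vals.popleft()
--         repeat_list.append(c)
--     return repeat_list
-- ===== Notes on version B (the rewrite author's own statement) =====
-- stated objective: alternative
-- what changed: Replaces Counter-building and per-index dictionary lookup with a sort-then-merge sweep: the data is sorted once into a deque and a cursor consumes each run of equal values while k walks through the range, so no counting table or hashing is ever used.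
import Mathlib
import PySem

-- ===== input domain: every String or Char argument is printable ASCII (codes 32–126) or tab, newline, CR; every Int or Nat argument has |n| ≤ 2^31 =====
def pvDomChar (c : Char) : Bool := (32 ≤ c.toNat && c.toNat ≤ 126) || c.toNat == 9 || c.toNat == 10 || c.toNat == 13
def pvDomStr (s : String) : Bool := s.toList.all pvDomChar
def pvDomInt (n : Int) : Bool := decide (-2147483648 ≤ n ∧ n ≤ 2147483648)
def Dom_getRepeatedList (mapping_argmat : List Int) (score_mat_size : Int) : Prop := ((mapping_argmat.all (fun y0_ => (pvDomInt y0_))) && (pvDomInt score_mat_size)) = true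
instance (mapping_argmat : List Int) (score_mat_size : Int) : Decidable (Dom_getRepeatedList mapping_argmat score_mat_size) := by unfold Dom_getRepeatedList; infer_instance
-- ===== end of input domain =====

-- B replaces A's Counter + per-index lookup by a sort-then-merge sweep over the sorted data (alternative algorithm).

-- ===== PORT A =====
def getRepeatedList (mapping_argmat : List Int) (score_mat_size : Int) : List Int :=
  let count_dict := PySem.Dict.counter mapping_argmat
  (PySem.List.pyRange 0 score_mat_size 1).foldl
    (fun repeat_list k =>
      if count_dict.contains k then repeat_list ++ [count_dict.getD k 0]
      else repeat_list ++ [0]) []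

-- ===== PORT B =====
-- 'while vals and vals[0] < k: vals = vals[1:]' — structural recursion on vals
def dropLt (k : Int) : List Int → List Int
  | [] => []
  | a :: l => if a < k then dropLt k l else a :: l

-- 'c = 0; while vals and vals[0] == k: c += 1; vals = vals[1:]' — returns (c, remaining vals)
def takeRun (k : Int) : List Int → Int × List Int
  | [] => (0, [])
  | a :: l => if a = k then ((takeRun k l).1 + 1, (takeRun k l).2) else (0, a :: l)

def getRepeatedList_alt (mapping_argmat : List Int) (score_mat_size : Int) : List Int :=
  ((PySem.List.pyRange 0 score_mat_size 1).foldl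
    (fun st k =>
      let vals := dropLt k st.1
      let cr := takeRun k vals
      (cr.2, st.2 ++ [cr.1]))
    (PySem.List.sorted mapping_argmat (fun x => x) false, [])).2

-- ===== PRECONDITION & SPEC =====
def Spec_getRepeatedList (mapping_argmat : List Int) (score_mat_size : Int) (out : List Int) : Prop := out = getRepeatedList_alt mapping_argmat score_mat_size
instance (mapping_argmat : List Int) (score_mat_size : Int) (out : List Int) : Decidable (Spec_getRepeatedList mapping_argmat score_mat_size out) := by unfold Spec_getRepeatedList; infer_instance

-- ===== CLAIM (what is proved, stated in full; the proofs are below) =====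
def Claim_equal_getRepeatedList : Prop := ∀ (mapping_argmat : List Int) (score_mat_size : Int), Dom_getRepeatedList mapping_argmat score_mat_size → Spec_getRepeatedList mapping_argmat score_mat_size (getRepeatedList mapping_argmat score_mat_size)

-- ===== LEMMAS AND PROOFS =====

-- A's loop value at each k equals the plain count of k in the data.
theorem counter_branch_eq_count (m : List Int) (k : Int) :
    (if (PySem.Dict.counter m).contains k then (PySem.Dict.counter m).getD k 0 else (0 : Int))
      = (m.count k : Int) := by
  by_cases h : (PySem.Dict.counter m).contains k = true
  · simp [h, PySem.Dict.getD_counter]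
  · have hnm : k ∉ m := by
      intro hk
      exact h (by simp [PySem.Dict.contains_counter, hk])
    simp [h, List.count_eq_zero_of_not_mem hnm]

-- A's result is the map of counts over the range.
theorem portA_eq_map (m : List Int) (s : Int) :
    getRepeatedList m s = (PySem.List.pyRange 0 s 1).map (fun k => (m.count k : Int)) := by
  unfold getRepeatedList
  have h : ∀ (init : List Int) (l : List Int),
      l.foldl (fun repeat_list k =>
        if (PySem.Dict.counter m).contains k then repeat_list ++ [(PySem.Dict.counter m).getD k 0]
        else repeat_list ++ [0]) init
        = init ++ l.map (fun k => (m.count k : Int)) := by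
    intro init l
    induction l generalizing init with
    | nil => simp
    | cons a l ih =>
      simp only [List.foldl_cons, List.map_cons]
      by_cases ha : (PySem.Dict.counter m).contains a = true
      · rw [if_pos ha, ih]
        have := counter_branch_eq_count m a
        rw [if_pos ha] at this
        simp [this]
      · rw [if_neg ha, ih]
        have := counter_branch_eq_count m a
        rw [if_neg ha] at this
        simp [this]
  simpa using h [] _

-- On a sorted list, the first while loop just filters out the values below k.
theorem dropLt_eq_filter (k : Int) (l : List Int) (hl : l.Pairwise (· ≤ ·)) :
    dropLt k l = l.filter (fun x => decide (k ≤ x)) := by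
  induction l with
  | nil => rfl
  | cons a l ih =>
    rcases List.pairwise_cons.mp hl with ⟨ha, hl'⟩
    by_cases h : a < k
    · simp [dropLt, h, ih hl', show ¬ (k ≤ a) by omega]
    · have hall : ∀ x ∈ l, k ≤ x := fun x hx => le_trans (by omega) (ha x hx)
      have hself : l.filter (fun x => decide (k ≤ x)) = l :=
        List.filter_eq_self.mpr (fun x hx => by simpa using hall x hx)
      simp [dropLt, h, show k ≤ a by omega, hself]

-- On a sorted list whose values are all ≥ k, the second while loop counts the
-- leading run of k's — i.e. all occurrences of k — and leaves the values > k.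
theorem takeRun_spec (k : Int) (l : List Int) (hl : l.Pairwise (· ≤ ·))
    (hge : ∀ x ∈ l, k ≤ x) :
    takeRun k l = ((l.count k : Int), l.filter (fun x => decide (k < x))) := by
  induction l with
  | nil => rfl
  | cons a l ih =>
    rcases List.pairwise_cons.mp hl with ⟨ha, hl'⟩
    by_cases h : a = k
    · subst h
      have := ih hl' (fun x hx => hge x (List.mem_cons_of_mem _ hx))
      simp [takeRun, this]
    · have hka : k < a := lt_of_le_of_ne (hge a (List.mem_cons_self)) (Ne.symm h)
      have hcnt : l.count k = 0 := by
        apply List.count_eq_zero_of_not_mem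
        intro hk
        have := ha k hk
        omega
      have hfil : l.filter (fun x => decide (k < x)) = l :=
        List.filter_eq_self.mpr (fun x hx => by
          have := ha x hx; simp; omega)
      simp [takeRun, h, hcnt, hka, hfil]

-- One iteration of B's loop on sorted data: emit count k, keep the values > k.
theorem step_spec (k : Int) (l : List Int) (hl : l.Pairwise (· ≤ ·)) :
    takeRun k (dropLt k l) = ((l.count k : Int), l.filter (fun x => decide (k < x))) := by
  rw [dropLt_eq_filter k l hl]
  have hpw : (l.filter (fun x => decide (k ≤ x))).Pairwise (· ≤ ·) := List.Pairwise.filter _ hl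
  have hge : ∀ x ∈ l.filter (fun x => decide (k ≤ x)), k ≤ x := fun x hx => by
    have := List.of_mem_filter hx; simpa using this
  rw [takeRun_spec k _ hpw hge]
  simp only [Prod.mk.injEq]
  constructor
  · congr 1
    exact List.count_filter (by simp)
  · rw [List.filter_filter]
    apply List.filter_congr
    intro x _
    simp; omega

-- B's whole fold over a strictly increasing list of targets produces the counts.
theorem fold_spec (ks : List Int) (hks : ks.Pairwise (· < ·)) :
    ∀ (l acc : List Int), l.Pairwise (· ≤ ·) →
      ((ks.foldl (fun st k =>
          let vals := dropLt k st.1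
          let cr := takeRun k vals
          (cr.2, st.2 ++ [cr.1])) (l, acc)).2
        = acc ++ ks.map (fun k => (l.count k : Int))) := by
  induction ks with
  | nil => intro l acc _; simp
  | cons k ks ih =>
    intro l acc hl
    rcases List.pairwise_cons.mp hks with ⟨hk, hks'⟩
    simp only [List.foldl_cons, List.map_cons]
    rw [step_spec k l hl]
    have hpw : (l.filter (fun x => decide (k < x))).Pairwise (· ≤ ·) := List.Pairwise.filter _ hl
    rw [ih hks' _ _ hpw]
    have hmap : ks.map (fun k' => ((l.filter (fun x => decide (k < x))).count k' : Int))
        = ks.map (fun k' => (l.count k' : Int)) := by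
      apply List.map_congr_left
      intro k' hk'
      congr 1
      exact List.count_filter (by simp; exact hk k' hk')
    rw [hmap]
    simp

-- ===== VERDICT (by name: the statement is the Claim_ definition above) =====
theorem getRepeatedList_spec : Claim_equal_getRepeatedList := by
  intro m s _
  unfold Spec_getRepeatedList
  rw [portA_eq_map]
  unfold getRepeatedList_alt
  rw [fold_spec _ (PySem.List.pairwise_lt_pyRange_one 0 s) _ []
    (by simpa using PySem.List.sorted_pairwise m (fun x => x) )]
  simp only [List.nil_append]
  apply List.map_congr_left
  intro k _
  congr 1
  exact ((PySem.List.sorted_perm m (fun x => x) false).count_eq k).symm
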